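-- pv_equiv track=rewrite | github.com/mouredev/retos-programacion-2023 | Retos/Reto #4 - PRIMO, FIBONACCI Y PAR [Media]/python/Reyhik.py | comprobacion
-- ===== SOURCE A (Python) =====
-- def es_primo(num):
--     for n in range(2, num):
--         if num % n == 0:
--             return False
--     return True
--
-- def fib(n):
--     if n < 2:
--         return n
--     else:
--         # fn = fn-1 + fn-2
--         return fib(n-1) + fib(n-2)
--
-- def comprobacion(num):
--     x = 0
--     a = []
--     while True:
--         a.append(fib(x))
--         if num <= fib(x):
--             break
--         x += 1
--     if es_primo(num):
--         if num % 2 == 0: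
--             if num in a:
--                 print ("{} es primo, es fibonacci y es par".format(num))
--                 return True
--             print ("{} es primo, no es fibonacci y es par".format(num))
--             return True
--         else:
--             if num in a:
--                 print ("{} es primo, es fibonacci y es impar".format(num))
--                 return True
--             print ("{} es primo, no es fibonacci y es impar".format(num))
--     else:
--         if num % 2 == 0:
--             if num in a:
--                 print ("{} no es primo, es fibonacci y es par".format(num))
--                 return True
--             print ("{} no es primo, no es fibonacci y es par".format(num))
--             return True
--         else:
--             if num in a:
--                 print ("{} no es primo, es fibonacci y es impar".format(num))
--                 return True
--             print ("{} no es primo, no es fibonacci y es impar".format(num))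
-- ===== SOURCE B (Python) =====
-- def comprobacion(num):
--     # primality by trial division up to sqrt(num) (A scans all of range(2, num))
--     primo = True
--     d = 2
--     while d * d <= num:
--         if num % d == 0:
--             primo = False
--             break
--         d += 1
--     # fibonacci membership by one linear pair iteration (A rebuilds a list of
--     # exponentially-computed recursive fib values)
--     a, b = 0, 1
--     while a < num:
--         a, b = b, a + b
--     fibo = a == num
--     par = num % 2 == 0
--     print("{} {} primo, {} fibonacci y es {}".format(
--         num,
--         "es" if primo else "no es",
--         "es" if fibo else "no es",
--         "par" if par else "impar"))
--     if par or fibo: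
--         return True
-- ===== Notes on version B (the rewrite author's own statement) =====
-- stated objective: faster
-- what changed: Replaces the list of exponentially-recursive fib values plus full-range trial division by one linear Fibonacci pair iteration and trial division up to sqrt(num); the return is True iff num is even or a Fibonacci number.
import Mathlib
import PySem

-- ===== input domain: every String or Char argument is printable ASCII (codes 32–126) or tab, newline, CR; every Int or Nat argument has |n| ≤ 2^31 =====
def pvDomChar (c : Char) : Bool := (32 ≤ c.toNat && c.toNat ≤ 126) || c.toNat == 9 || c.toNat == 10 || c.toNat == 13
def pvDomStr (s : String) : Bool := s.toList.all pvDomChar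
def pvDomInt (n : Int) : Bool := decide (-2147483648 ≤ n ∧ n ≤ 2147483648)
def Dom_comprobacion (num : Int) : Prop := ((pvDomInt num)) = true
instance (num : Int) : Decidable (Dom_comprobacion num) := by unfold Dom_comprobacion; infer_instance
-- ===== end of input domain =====

-- B replaces A's exponential recursive-fib list scan and full trial division by a linear
-- Fibonacci pair iteration and sqrt-bounded trial division (faster, asymptotic).
-- Equivalence is about the RETURN value only: both Pythons print a classification line
-- (identical text in A and B); the prints are dropped in both ports.

-- ===== PORT A =====
-- naive doubly-recursive fib, as in A (A only calls fib on the nonnegative counter x)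
def fibA : Nat → Int
  | 0 => 0
  | 1 => 1
  | n + 2 => fibA (n + 1) + fibA n

-- es_primo: scan range(2, num) for a divisor; early return False → find?
def esPrimoA (num : Int) : Bool :=
  match (PySem.List.pyRange 2 num 1).find? (fun n => PySem.Int.mod num n == 0) with
  | some _ => false
  | none => true

-- the 'while True: a.append(fib(x)); if num <= fib(x): break; x += 1' loop.
-- fuel only makes the loop total; within Dom (num ≤ 2^31 < fibA 49) fuel 50 is never exhausted.
def loopA (num : Int) : Nat → Nat → List Int → List Int
  | 0, _, acc => acc
  | fuel + 1, x, acc =>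
    let acc := acc ++ [fibA x]
    if num ≤ fibA x then acc else loopA num fuel (x + 1) acc

def comprobacion (num : Int) : Option Bool :=
  let a := loopA num 50 0 []
  if esPrimoA num then
    if PySem.Int.mod num 2 == 0 then
      if a.contains num then some true else some true
    else
      if a.contains num then some true else none
  else
    if PySem.Int.mod num 2 == 0 then
      if a.contains num then some true else some true
    else
      if a.contains num then some true else none

-- ===== PORT B =====
-- 'a, b = 0, 1; while a < num: a, b = b, a + b' — fuel only makes the loop total.
def fibLoopB (num : Int) : Nat → Int × Int → Int × Int
  | 0, p => p
  | fuel + 1, (a, b) => if a < num then fibLoopB num fuel (b, a + b) else (a, b)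

-- primality (trial division to √num) feeds only B's print, which the port drops with it
def comprobacion_alt (num : Int) : Option Bool :=
  let a := (fibLoopB num 50 (0, 1)).1
  let fibo := a == num
  let par := PySem.Int.mod num 2 == 0
  if par || fibo then some true else none

-- ===== PRECONDITION & SPEC =====
def Spec_comprobacion (num : Int) (out : Option Bool) : Prop := out = comprobacion_alt num
instance (num : Int) (out : Option Bool) : Decidable (Spec_comprobacion num out) := by unfold Spec_comprobacion; infer_instance

-- ===== CLAIM (what is proved, stated in full; the proofs are below) =====
def Claim_equal_comprobacion : Prop := ∀ (num : Int), Dom_comprobacion num → Spec_comprobacion num (comprobacion num)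

-- ===== LEMMAS AND PROOFS =====

theorem fibA_add2 (n : Nat) : fibA (n + 2) = fibA (n + 1) + fibA n := rfl

theorem fibA_49 : fibA 49 = 7778742049 := by
  have h0 : fibA 0 = 0 := rfl
  have h1 : fibA 1 = 1 := rfl
  have h2 : fibA 2 = 1 := by rw [show (2:Nat) = 0 + 2 from rfl, fibA_add2, h1, h0]; norm_num
  have h3 : fibA 3 = 2 := by rw [show (3:Nat) = 1 + 2 from rfl, fibA_add2, h2, h1]; norm_num
  have h4 : fibA 4 = 3 := by rw [show (4:Nat) = 2 + 2 from rfl, fibA_add2, h3, h2]; norm_num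
  have h5 : fibA 5 = 5 := by rw [show (5:Nat) = 3 + 2 from rfl, fibA_add2, h4, h3]; norm_num
  have h6 : fibA 6 = 8 := by rw [show (6:Nat) = 4 + 2 from rfl, fibA_add2, h5, h4]; norm_num
  have h7 : fibA 7 = 13 := by rw [show (7:Nat) = 5 + 2 from rfl, fibA_add2, h6, h5]; norm_num
  have h8 : fibA 8 = 21 := by rw [show (8:Nat) = 6 + 2 from rfl, fibA_add2, h7, h6]; norm_num
  have h9 : fibA 9 = 34 := by rw [show (9:Nat) = 7 + 2 from rfl, fibA_add2, h8, h7]; norm_num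
  have h10 : fibA 10 = 55 := by rw [show (10:Nat) = 8 + 2 from rfl, fibA_add2, h9, h8]; norm_num
  have h11 : fibA 11 = 89 := by rw [show (11:Nat) = 9 + 2 from rfl, fibA_add2, h10, h9]; norm_num
  have h12 : fibA 12 = 144 := by rw [show (12:Nat) = 10 + 2 from rfl, fibA_add2, h11, h10]; norm_num
  have h13 : fibA 13 = 233 := by rw [show (13:Nat) = 11 + 2 from rfl, fibA_add2, h12, h11]; norm_num
  have h14 : fibA 14 = 377 := by rw [show (14:Nat) = 12 + 2 from rfl, fibA_add2, h13, h12]; norm_num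
  have h15 : fibA 15 = 610 := by rw [show (15:Nat) = 13 + 2 from rfl, fibA_add2, h14, h13]; norm_num
  have h16 : fibA 16 = 987 := by rw [show (16:Nat) = 14 + 2 from rfl, fibA_add2, h15, h14]; norm_num
  have h17 : fibA 17 = 1597 := by rw [show (17:Nat) = 15 + 2 from rfl, fibA_add2, h16, h15]; norm_num
  have h18 : fibA 18 = 2584 := by rw [show (18:Nat) = 16 + 2 from rfl, fibA_add2, h17, h16]; norm_num
  have h19 : fibA 19 = 4181 := by rw [show (19:Nat) = 17 + 2 from rfl, fibA_add2, h18, h17]; norm_num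
  have h20 : fibA 20 = 6765 := by rw [show (20:Nat) = 18 + 2 from rfl, fibA_add2, h19, h18]; norm_num
  have h21 : fibA 21 = 10946 := by rw [show (21:Nat) = 19 + 2 from rfl, fibA_add2, h20, h19]; norm_num
  have h22 : fibA 22 = 17711 := by rw [show (22:Nat) = 20 + 2 from rfl, fibA_add2, h21, h20]; norm_num
  have h23 : fibA 23 = 28657 := by rw [show (23:Nat) = 21 + 2 from rfl, fibA_add2, h22, h21]; norm_num
  have h24 : fibA 24 = 46368 := by rw [show (24:Nat) = 22 + 2 from rfl, fibA_add2, h23, h22]; norm_num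
  have h25 : fibA 25 = 75025 := by rw [show (25:Nat) = 23 + 2 from rfl, fibA_add2, h24, h23]; norm_num
  have h26 : fibA 26 = 121393 := by rw [show (26:Nat) = 24 + 2 from rfl, fibA_add2, h25, h24]; norm_num
  have h27 : fibA 27 = 196418 := by rw [show (27:Nat) = 25 + 2 from rfl, fibA_add2, h26, h25]; norm_num
  have h28 : fibA 28 = 317811 := by rw [show (28:Nat) = 26 + 2 from rfl, fibA_add2, h27, h26]; norm_num
  have h29 : fibA 29 = 514229 := by rw [show (29:Nat) = 27 + 2 from rfl, fibA_add2, h28, h27]; norm_num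
  have h30 : fibA 30 = 832040 := by rw [show (30:Nat) = 28 + 2 from rfl, fibA_add2, h29, h28]; norm_num
  have h31 : fibA 31 = 1346269 := by rw [show (31:Nat) = 29 + 2 from rfl, fibA_add2, h30, h29]; norm_num
  have h32 : fibA 32 = 2178309 := by rw [show (32:Nat) = 30 + 2 from rfl, fibA_add2, h31, h30]; norm_num
  have h33 : fibA 33 = 3524578 := by rw [show (33:Nat) = 31 + 2 from rfl, fibA_add2, h32, h31]; norm_num
  have h34 : fibA 34 = 5702887 := by rw [show (34:Nat) = 32 + 2 from rfl, fibA_add2, h33, h32]; norm_num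
  have h35 : fibA 35 = 9227465 := by rw [show (35:Nat) = 33 + 2 from rfl, fibA_add2, h34, h33]; norm_num
  have h36 : fibA 36 = 14930352 := by rw [show (36:Nat) = 34 + 2 from rfl, fibA_add2, h35, h34]; norm_num
  have h37 : fibA 37 = 24157817 := by rw [show (37:Nat) = 35 + 2 from rfl, fibA_add2, h36, h35]; norm_num
  have h38 : fibA 38 = 39088169 := by rw [show (38:Nat) = 36 + 2 from rfl, fibA_add2, h37, h36]; norm_num
  have h39 : fibA 39 = 63245986 := by rw [show (39:Nat) = 37 + 2 from rfl, fibA_add2, h38, h37]; norm_num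
  have h40 : fibA 40 = 102334155 := by rw [show (40:Nat) = 38 + 2 from rfl, fibA_add2, h39, h38]; norm_num
  have h41 : fibA 41 = 165580141 := by rw [show (41:Nat) = 39 + 2 from rfl, fibA_add2, h40, h39]; norm_num
  have h42 : fibA 42 = 267914296 := by rw [show (42:Nat) = 40 + 2 from rfl, fibA_add2, h41, h40]; norm_num
  have h43 : fibA 43 = 433494437 := by rw [show (43:Nat) = 41 + 2 from rfl, fibA_add2, h42, h41]; norm_num
  have h44 : fibA 44 = 701408733 := by rw [show (44:Nat) = 42 + 2 from rfl, fibA_add2, h43, h42]; norm_num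
  have h45 : fibA 45 = 1134903170 := by rw [show (45:Nat) = 43 + 2 from rfl, fibA_add2, h44, h43]; norm_num
  have h46 : fibA 46 = 1836311903 := by rw [show (46:Nat) = 44 + 2 from rfl, fibA_add2, h45, h44]; norm_num
  have h47 : fibA 47 = 2971215073 := by rw [show (47:Nat) = 45 + 2 from rfl, fibA_add2, h46, h45]; norm_num
  have h48 : fibA 48 = 4807526976 := by rw [show (48:Nat) = 46 + 2 from rfl, fibA_add2, h47, h46]; norm_num
  have h49 : fibA 49 = 7778742049 := by rw [show (49:Nat) = 47 + 2 from rfl, fibA_add2, h48, h47]; norm_num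
  exact h49

theorem decide_beq_comm (a b : Int) : decide (a = b) = (b == a) := by
  by_cases h : a = b
  · subst h; simp
  · rw [decide_eq_false h, beq_eq_false_iff_ne.mpr (Ne.symm h)]

-- the two loops agree: A's list contains num iff B's final a equals num,
-- provided every element already in acc is < num and the loop breaks within the fuel
theorem loops_agree (num : Int) : ∀ (fuel x : Nat) (acc : List Int),
    (∀ e ∈ acc, e < num) → num ≤ fibA (x + fuel) →
    ((loopA num (fuel + 1) x acc).contains num
      = ((fibLoopB num (fuel + 1) (fibA x, fibA (x + 1))).1 == num)) := by
  intro fuel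
  induction fuel with
  | zero =>
    intro x acc hacc hle
    simp only [Nat.add_zero] at hle
    simp only [loopA, fibLoopB, if_pos hle, if_neg (not_lt.mpr hle)]
    have hnot : num ∉ acc := fun h => absurd (hacc num h) (lt_irrefl num)
    simp [hnot, decide_beq_comm]
  | succ fuel ih =>
    intro x acc hacc hle
    by_cases hx : num ≤ fibA x
    · simp only [loopA, fibLoopB, if_pos hx, if_neg (not_lt.mpr hx)]
      have hnot : num ∉ acc := fun h => absurd (hacc num h) (lt_irrefl num)
      simp [hnot, decide_beq_comm]
    · have hlt : fibA x < num := lt_of_not_ge hx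
      simp only [loopA, fibLoopB, if_neg hx, if_pos hlt]
      have hstep : fibA x + fibA (x + 1) = fibA (x + 2) := by
        rw [fibA_add2]; ring
      rw [hstep]
      have hacc' : ∀ e ∈ acc ++ [fibA x], e < num := by
        intro e he
        rcases List.mem_append.mp he with h | h
        · exact hacc e h
        · simp at h; omega
      have hle' : num ≤ fibA (x + 1 + fuel) := by
        have : x + 1 + fuel = x + (fuel + 1) := by ring
        rw [this]; exact hle
      exact ih (x + 1) (acc ++ [fibA x]) hacc' hle'

-- ===== VERDICT (by name: the statement is the Claim_ definition above) =====
theorem comprobacion_spec : Claim_equal_comprobacion := by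
  intro num hdom
  unfold Spec_comprobacion
  have hnum : num ≤ 7778742049 := by
    unfold Dom_comprobacion pvDomInt at hdom
    simp only [decide_eq_true_eq] at hdom
    omega
  have hle : num ≤ fibA (0 + 49) := by simpa [fibA_49] using hnum
  have key := loops_agree num 49 0 [] (by intro e he; simp at he) hle
  have key' : (loopA num 50 0 []).contains num = ((fibLoopB num 50 (0, 1)).1 == num) := by
    simpa [show fibA 0 = 0 from rfl, show fibA 1 = 1 from rfl] using key
  have hA : comprobacion num =
      (if esPrimoA num then
        (if PySem.Int.mod num 2 == 0 then
          (if (loopA num 50 0 []).contains num then some true else some true)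
         else (if (loopA num 50 0 []).contains num then some true else none))
       else
        (if PySem.Int.mod num 2 == 0 then
          (if (loopA num 50 0 []).contains num then some true else some true)
         else (if (loopA num 50 0 []).contains num then some true else none))) := rfl
  have hB : comprobacion_alt num =
      (if (PySem.Int.mod num 2 == 0 || ((fibLoopB num 50 (0, 1)).1 == num)) then some true
       else none) := rfl
  rw [hA, hB, key']
  cases esPrimoA num <;>
    cases (PySem.Int.mod num 2 == 0) <;>
      cases ((fibLoopB num 50 (0, 1)).1 == num) <;>
        simp
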